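-- pv_equiv track=rewrite | github.com/vjsingh1984/victor | tests/integration/notebooks/test_first_agent.py | _select_model
-- ===== SOURCE A (Python) =====
-- def _select_model(models: list[str]) -> str:
--     """Select preferred model with sensible fallback.
--
--     Priority order (Qwen 3.5 first - latest 2026 generation):
--     1. qwen3.5:4b - 4B parameters, 3.4GB, 256K context, tool calling
--     2. qwen3.5:2b - 2B parameters, 2.7GB
--     3. qwen3.5:0.8b - 0.8B parameters, 1GB
--     4. qwen3-coder - Coding optimized
--     5. qwen2.5:3b - Legacy fallback
--     6. First available model as fallback
--     """
--     # Qwen 3.5 models first (latest generation, 256K context)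
--     fast_models = [
--         "qwen3.5:4b",  # 3.4GB - Best balance: speed + tool calling
--         "qwen3.5:2b",  # 2.7GB - Very fast
--         "qwen3.5:0.8b",  # 1GB - Ultra fast
--         "qwen3.5:9b",  # 6.6GB - Capable
--         "qwen3-coder",  # Qwen3 coding optimized
--         "qwen3-coder-next",
--         # Legacy Qwen 2.5 fallbacks
--         "qwen2.5:3b",
--         "qwen2.5-coder:3b",
--         "qwen2.5-coder:7b",
--         "qwen2.5:7b",
--         # Other fast models
--         "phi-4:3.8b-mini",
--         "phi-4-mini",
--         "llama3.2:3b",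
--         "llama3.1:8b",
--         "gemma3:4b",
--     ]
--
--     for model in fast_models:
--         # Match with or without tag suffix (e.g., "qwen3.5:4b" matches "qwen3.5:4b-q4_K_M")
--         if any(
--             model == m or m.startswith(model + "-") or m.startswith(model + ":") for m in models
--         ):
--             return model
--
--     # Fallback to first available
--     return models[0]
-- ===== SOURCE B (Python) =====
-- def _select_model(models: list[str]) -> str:
--     """Select preferred model: argmin over priority indices matched by any model."""
--     fast_models = [
--         "qwen3.5:4b",
--         "qwen3.5:2b",
--         "qwen3.5:0.8b",
--         "qwen3.5:9b",
--         "qwen3-coder",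
--         "qwen3-coder-next",
--         "qwen2.5:3b",
--         "qwen2.5-coder:3b",
--         "qwen2.5-coder:7b",
--         "qwen2.5:7b",
--         "phi-4:3.8b-mini",
--         "phi-4-mini",
--         "llama3.2:3b",
--         "llama3.1:8b",
--         "gemma3:4b",
--     ]
--     best = None
--     for m in models:
--         for i, p in enumerate(fast_models):
--             if p == m or m.startswith(p + "-") or m.startswith(p + ":"):
--                 if best is None or i < best:
--                     best = i
--     if best is not None:
--         return fast_models[best]
--     return models[0]
-- ===== Notes on version B (the rewrite author's own statement) =====
-- stated objective: alternative
-- what changed: Replaces A's early-returning outer loop over the priority list (with an inner any() over models) by a single full scan over models that computes the minimum matched priority index and indexes the priority list once at the end.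
import Mathlib
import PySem

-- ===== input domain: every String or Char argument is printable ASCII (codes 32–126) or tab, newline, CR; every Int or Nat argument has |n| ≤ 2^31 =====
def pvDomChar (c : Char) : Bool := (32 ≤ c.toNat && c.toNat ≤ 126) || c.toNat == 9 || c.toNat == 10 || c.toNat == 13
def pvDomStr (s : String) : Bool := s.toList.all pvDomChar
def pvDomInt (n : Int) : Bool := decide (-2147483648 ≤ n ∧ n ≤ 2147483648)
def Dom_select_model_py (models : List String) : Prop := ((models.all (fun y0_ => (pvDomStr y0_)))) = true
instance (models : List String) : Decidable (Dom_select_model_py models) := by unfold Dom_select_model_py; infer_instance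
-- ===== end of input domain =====

-- B replaces A's early-returning priority loop with a single argmin scan over the
-- input models tracking the minimum matched priority index (objective: alternative).


-- the fixed priority list (shared constant of both Pythons)
def pvFast : List String :=
  ["qwen3.5:4b", "qwen3.5:2b", "qwen3.5:0.8b", "qwen3.5:9b", "qwen3-coder",
   "qwen3-coder-next", "qwen2.5:3b", "qwen2.5-coder:3b", "qwen2.5-coder:7b",
   "qwen2.5:7b", "phi-4:3.8b-mini", "phi-4-mini", "llama3.2:3b", "llama3.1:8b",
   "gemma3:4b"]

-- `model == m or m.startswith(model + "-") or m.startswith(model + ":")` (same text in A and B)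
def pvMatch (p m : String) : Bool :=
  (p == m) || PySem.Str.startswith m (p ++ "-") || PySem.Str.startswith m (p ++ ":")

-- ===== PORT A =====
-- `for model in fast_models: if any(... for m in models): return model` / fallback `models[0]`
def select_model_py (models : List String) : String :=
  match pvFast.find? (fun p => models.any (fun m => pvMatch p m)) with
  | some p => p
  | none => (PySem.List.pyGet? models 0).getD ""   -- Pre_ excludes [], where Python raises

-- ===== PORT B =====
-- inner body: `if match: best = i if best is None or i < best else best`
def pvStep (m : String) (acc : Option Nat) (pi : String × Nat) : Option Nat :=
  if pvMatch pi.1 m then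
    match acc with
    | none => some pi.2
    | some b => if pi.2 < b then some pi.2 else acc
  else acc

def select_model_py_alt (models : List String) : String :=
  match models.foldl (fun acc m => (pvFast.zipIdx).foldl (pvStep m) acc) none with
  | some b => pvFast.getD b ""
  | none => (PySem.List.pyGet? models 0).getD ""   -- Pre_ excludes [], where Python raises

-- ===== PRECONDITION & SPEC =====
-- Pre_ excludes the empty list, on which both Pythons raise IndexError at `models[0]`.
def Pre_select_model_py (models : List String) : Prop := models ≠ []
instance (models : List String) : Decidable (Pre_select_model_py models) := by
  unfold Pre_select_model_py; infer_instance

def pvWitness_select_model_py : List String := ["some-model"]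

def Spec_select_model_py (models : List String) (out : String) : Prop := out = select_model_py_alt models
instance (models : List String) (out : String) : Decidable (Spec_select_model_py models out) := by unfold Spec_select_model_py; infer_instance

-- ===== CLAIM (what is proved, stated in full; the proofs are below) =====
def Claim_equal_select_model_py : Prop := ∀ (models : List String), Dom_select_model_py models → Pre_select_model_py models → Spec_select_model_py models (select_model_py models)

-- ===== LEMMAS AND PROOFS =====

-- option minimum (what B's running `best` combines by)
def pvOmin : Option Nat → Option Nat → Option Nat
  | none, y => y
  | some a, none => some a
  | some a, some b => some (min a b)

theorem pvOmin_none_left (y : Option Nat) : pvOmin none y = y := rfl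

theorem pvOmin_assoc (x y z : Option Nat) :
    pvOmin (pvOmin x y) z = pvOmin x (pvOmin y z) := by
  rcases x with _ | a <;> rcases y with _ | b <;> rcases z with _ | c <;>
    simp [pvOmin, Nat.min_assoc]

theorem pvStep_eq_omin (m : String) (acc : Option Nat) (pi : String × Nat) :
    pvStep m acc pi = if pvMatch pi.1 m then pvOmin acc (some pi.2) else acc := by
  rcases acc with _ | b <;> simp [pvStep, pvOmin]
  split_ifs <;> simp [Nat.min_def] <;> omega

theorem inner_hom (m : String) (l : List (String × Nat)) :
    ∀ acc, l.foldl (pvStep m) acc = pvOmin acc (l.foldl (pvStep m) none) := by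
  induction l with
  | nil => intro acc; rcases acc with _ | a <;> simp [pvOmin]
  | cons x l ih =>
      intro acc
      simp only [List.foldl_cons]
      rw [ih (pvStep m acc x), ih (pvStep m none x)]
      rw [pvStep_eq_omin, pvStep_eq_omin]
      split_ifs <;> simp [pvOmin_none_left, pvOmin_assoc]

theorem pvOmin_map_succ (x y : Option Nat) :
    pvOmin (x.map (· + 1)) (y.map (· + 1)) = (pvOmin x y).map (· + 1) := by
  rcases x with _ | a <;> rcases y with _ | b <;> simp [pvOmin, Nat.min_def]
  split_ifs <;> omega

theorem inner_eq_findIdx (m : String) :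
    ∀ (ps : List String) (k : Nat),
      (ps.zipIdx k).foldl (pvStep m) none
        = (ps.findIdx? (fun p => pvMatch p m)).map (· + k) := by
  intro ps
  induction ps with
  | nil => intro k; simp [List.findIdx?_nil]
  | cons p ps ih =>
      intro k
      rw [List.zipIdx_cons, List.foldl_cons, inner_hom, ih (k + 1),
        List.findIdx?_cons, pvStep_eq_omin]
      by_cases h : pvMatch p m
      · simp only [h]
        rcases hf : ps.findIdx? (fun p => pvMatch p m) with _ | j
        · simp [pvOmin]
        · simp [pvOmin, Nat.min_def]; omega
      · simp only [h]
        rcases hf : ps.findIdx? (fun p => pvMatch p m) with _ | j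
        · simp [pvOmin]
        · simp [pvOmin]; omega

theorem outer_hom (ps : List String) (ms : List String) :
    ∀ acc, ms.foldl (fun acc m => (ps.zipIdx).foldl (pvStep m) acc) acc
      = pvOmin acc (ms.foldl (fun acc m => (ps.zipIdx).foldl (pvStep m) acc) none) := by
  induction ms with
  | nil => intro acc; rcases acc with _ | a <;> simp [pvOmin]
  | cons m ms ih =>
      intro acc
      simp only [List.foldl_cons]
      rw [ih ((ps.zipIdx).foldl (pvStep m) acc), ih ((ps.zipIdx).foldl (pvStep m) none),
        inner_hom m _ acc, pvOmin_assoc]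

theorem omin_findIdx_cons (m : String) (q : String → Bool) :
    ∀ (ps : List String),
      pvOmin (ps.findIdx? (fun p => pvMatch p m)) (ps.findIdx? q)
        = ps.findIdx? (fun p => pvMatch p m || q p) := by
  intro ps
  induction ps with
  | nil => simp [List.findIdx?_nil, pvOmin]
  | cons p ps ih =>
      rw [List.findIdx?_cons, List.findIdx?_cons, List.findIdx?_cons]
      by_cases h1 : pvMatch p m
      · by_cases h2 : q p <;>
          · simp only [h1, h2]
            rcases hf : ps.findIdx? q with _ | j <;> simp [pvOmin]
      · by_cases h2 : q p
        · simp only [h1, h2]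
          rcases hf : ps.findIdx? (fun p => pvMatch p m) with _ | j <;> simp [pvOmin]
        · simp only [h1, h2, Bool.false_or, if_neg, Bool.false_eq_true, not_false_iff]
          rw [← ih, pvOmin_map_succ]

theorem best_eq_findIdx (ms : List String) (ps : List String) :
    ms.foldl (fun acc m => (ps.zipIdx).foldl (pvStep m) acc) none
      = ps.findIdx? (fun p => ms.any (fun m => pvMatch p m)) := by
  induction ms with
  | nil =>
      simp only [List.foldl_nil, List.any_nil]
      exact (List.findIdx?_eq_none_iff.2 (fun x _ => rfl)).symm
  | cons m ms ih =>
      simp only [List.foldl_cons]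
      rw [outer_hom, ih, inner_hom m _ none]
      have : ((ps.zipIdx 0).foldl (pvStep m) none) = ps.findIdx? (fun p => pvMatch p m) := by
        rw [inner_eq_findIdx m ps 0]
        rcases hf : ps.findIdx? (fun p => pvMatch p m) with _ | j <;> simp
      rw [pvOmin_none_left, this, omin_findIdx_cons]
      congr 1

theorem find?_of_findIdx? (q : String → Bool) :
    ∀ (ps : List String) (b : Nat), ps.findIdx? q = some b → ps.find? q = some (ps.getD b "") := by
  intro ps
  induction ps with
  | nil => intro b h; simp [List.findIdx?_nil] at h
  | cons p ps ih =>
      intro b h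
      rw [List.findIdx?_cons] at h
      rw [List.find?_cons]
      by_cases hq : q p
      · simp [hq] at h
        subst h
        simp [hq]
      · simp [hq] at h ⊢
        rcases h with ⟨j, hj, rfl⟩
        simpa using ih j hj

-- ===== VERDICT (by name: the statement is the Claim_ definition above) =====
theorem select_model_py_spec : Claim_equal_select_model_py := by
  intro models _ _
  unfold Spec_select_model_py select_model_py select_model_py_alt
  rw [best_eq_findIdx]
  rcases hf : pvFast.findIdx? (fun p => models.any (fun m => pvMatch p m)) with _ | b
  · rw [List.find?_eq_none.2 (fun x hx => by
      have := List.findIdx?_eq_none_iff.1 hf x hx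
      simp [this])]
  · rw [find?_of_findIdx? _ _ _ hf]
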